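-- pv_equiv track=rewrite | github.com/DPBath/Environmental-Timetable | timeTableTester.py | count_students_in_room_v5
-- ===== SOURCE A (Python) =====
-- def count_students_in_room_v5(specified_room, room_list, time_list, lec_list, lecture_list, timeslots):
--     students_in_room = {}
--
--     for time_slot in timeslots:
--         students_in_room[time_slot] = 0
--
--         for i, assigned_room in enumerate(room_list):
--             if assigned_room == specified_room and time_list[i] == time_slot:
--                 lecture = lec_list[i]
--                 students_in_room[time_slot] += lecture_list.count(lecture)
--
--     return students_in_room
-- ===== SOURCE B (Python) =====
-- def count_students_in_room_v5(specified_room, room_list, time_list, lec_list, lecture_list, timeslots):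
--     counts = {}
--     for lec in lecture_list:
--         counts[lec] = counts.get(lec, 0) + 1
--     students_in_room = {t: 0 for t in timeslots}
--     for room, time, lec in zip(room_list, time_list, lec_list):
--         if room == specified_room and time in students_in_room:
--             students_in_room[time] += counts.get(lec, 0)
--     return students_in_room
-- ===== Notes on version B (the rewrite author's own statement) =====
-- stated objective: faster
-- what changed: A rescans the whole room_list once per timeslot and calls lecture_list.count inside the loop (O(T*R*L)); B builds a count table of lecture_list once, initializes all timeslots to 0, and does a single zipped pass over room/time/lec, so the repeated scans disappear.
import Mathlib
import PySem

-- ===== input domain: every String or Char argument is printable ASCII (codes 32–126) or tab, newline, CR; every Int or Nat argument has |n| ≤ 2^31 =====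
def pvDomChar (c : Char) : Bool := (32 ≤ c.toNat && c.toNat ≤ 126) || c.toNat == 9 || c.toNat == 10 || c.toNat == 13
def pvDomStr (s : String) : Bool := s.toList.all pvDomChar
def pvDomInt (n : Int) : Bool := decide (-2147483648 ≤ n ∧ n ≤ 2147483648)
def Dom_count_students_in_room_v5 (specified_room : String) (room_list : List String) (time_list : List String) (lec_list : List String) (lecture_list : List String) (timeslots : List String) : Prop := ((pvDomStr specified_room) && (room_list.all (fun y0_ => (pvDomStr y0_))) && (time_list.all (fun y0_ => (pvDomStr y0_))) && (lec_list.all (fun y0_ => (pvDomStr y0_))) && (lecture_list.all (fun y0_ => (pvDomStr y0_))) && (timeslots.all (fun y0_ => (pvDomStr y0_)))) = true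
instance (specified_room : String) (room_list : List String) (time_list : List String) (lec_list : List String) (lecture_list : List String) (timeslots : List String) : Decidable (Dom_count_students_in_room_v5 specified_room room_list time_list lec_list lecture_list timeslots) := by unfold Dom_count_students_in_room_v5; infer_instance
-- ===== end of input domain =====

-- B replaces A's per-timeslot rescans of room_list (with lecture_list.count inside the loop)
-- by one lecture-count table plus a single zipped pass over room/time/lec; measured faster in a timing run.


-- ===== PORT A =====
-- A: for each timeslot, reset the entry to 0 and rescan all of room_list, adding
-- lecture_list.count(lec_list[i]) for each matching assignment.
def count_students_in_room_v5 (specified_room : String) (room_list : List String) (time_list : List String) (lec_list : List String) (lecture_list : List String) (timeslots : List String) : List (String × Int) :=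
  (timeslots.foldl (fun (d : PySem.Dict String Int) time_slot =>
      (PySem.List.enumerate room_list).foldl (fun d p =>
        if p.2 = specified_room ∧ (PySem.List.pyGet? time_list p.1).getD "" = time_slot then
          d.insert time_slot (d.getD time_slot 0 +
            ((lecture_list.count ((PySem.List.pyGet? lec_list p.1).getD "")) : Int))
        else d)
      (d.insert time_slot 0))
    PySem.Dict.empty).items
  -- pyGet?'s 'none' (IndexError in Python) only occurs outside Pre_; '.getD ""' is a dummy there.

-- ===== PORT B =====
-- B: build counts = occurrences in lecture_list, init every timeslot to 0, then one
-- zipped pass over (room, time, lec) adding counts[lec] to the matching timeslot.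
def count_students_in_room_v5_alt (specified_room : String) (room_list : List String) (time_list : List String) (lec_list : List String) (lecture_list : List String) (timeslots : List String) : List (String × Int) :=
  let counts : PySem.Dict String Int :=
    lecture_list.foldl (fun c lec => c.insert lec (c.getD lec 0 + 1)) PySem.Dict.empty
  let init : PySem.Dict String Int :=
    timeslots.foldl (fun (d : PySem.Dict String Int) t => d.insert t 0) PySem.Dict.empty
  ((room_list.zip (time_list.zip lec_list)).foldl (fun d p =>
      if p.1 = specified_room ∧ d.contains p.2.1 then
        d.insert p.2.1 (d.getD p.2.1 0 + counts.getD p.2.2 0)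
      else d)
    init).items

-- ===== PRECONDITION & SPEC =====
-- Pre_ excludes exactly the inputs on which A raises IndexError: an index i with
-- room_list[i] == specified_room but time_list too short, or additionally
-- time_list[i] in timeslots but lec_list too short (accessed only when timeslots is nonempty).
def Pre_count_students_in_room_v5 (specified_room : String) (room_list : List String) (time_list : List String) (lec_list : List String) (lecture_list : List String) (timeslots : List String) : Prop :=
  timeslots ≠ [] →
    ∀ i < room_list.length, room_list.getD i "" = specified_room →
      i < time_list.length ∧ (time_list.getD i "" ∈ timeslots → i < lec_list.length)
instance (specified_room : String) (room_list : List String) (time_list : List String) (lec_list : List String) (lecture_list : List String) (timeslots : List String) : Decidable (Pre_count_students_in_room_v5 specified_room room_list time_list lec_list lecture_list timeslots) := by unfold Pre_count_students_in_room_v5; infer_instance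

def pvWitness_count_students_in_room_v5 : String × List String × List String × List String × List String × List String :=
  ("R1", ["R1", "R2", "R1"], ["9am", "9am", "10am"], ["CS", "MA", "CS"], ["CS", "CS", "MA"], ["9am", "10am", "11am"])

def Spec_count_students_in_room_v5 (specified_room : String) (room_list : List String) (time_list : List String) (lec_list : List String) (lecture_list : List String) (timeslots : List String) (out : List (String × Int)) : Prop := out = count_students_in_room_v5_alt specified_room room_list time_list lec_list lecture_list timeslots
instance (specified_room : String) (room_list : List String) (time_list : List String) (lec_list : List String) (lecture_list : List String) (timeslots : List String) (out : List (String × Int)) : Decidable (Spec_count_students_in_room_v5 specified_room room_list time_list lec_list lecture_list timeslots out) := by unfold Spec_count_students_in_room_v5; infer_instance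

-- ===== CLAIM (what is proved, stated in full; the proofs are below) =====
def Claim_equal_count_students_in_room_v5 : Prop := ∀ (specified_room : String) (room_list : List String) (time_list : List String) (lec_list : List String) (lecture_list : List String) (timeslots : List String), Dom_count_students_in_room_v5 specified_room room_list time_list lec_list lecture_list timeslots → Pre_count_students_in_room_v5 specified_room room_list time_list lec_list lecture_list timeslots → Spec_count_students_in_room_v5 specified_room room_list time_list lec_list lecture_list timeslots (count_students_in_room_v5 specified_room room_list time_list lec_list lecture_list timeslots)

-- ===== LEMMAS AND PROOFS =====

-- A's per-index contribution to timeslot t, summed over an enumerate list.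
def pvSumA (spec t : String) (time lec lect : List String) (E : List (Int × String)) : Int :=
  (E.map (fun p => if p.2 = spec ∧ (PySem.List.pyGet? time p.1).getD "" = t
                   then ((lect.count ((PySem.List.pyGet? lec p.1).getD "")) : Int) else 0)).sum

-- B's per-triple contribution to timeslot t, summed over the zipped list.
def pvSumB (spec t : String) (c : String → Int) (L : List (String × String × String)) : Int :=
  (L.map (fun p => if p.1 = spec ∧ p.2.1 = t then c p.2.2 else 0)).sum

-- A's outer-loop body: reset slot t to 0 and rescan room_list.
def pvStepA (spec : String) (room time lec lect : List String)
    (d : PySem.Dict String Int) (t : String) : PySem.Dict String Int :=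
  (PySem.List.enumerate room).foldl (fun d p =>
      if p.2 = spec ∧ (PySem.List.pyGet? time p.1).getD "" = t then
        d.insert t (d.getD t 0 + ((lect.count ((PySem.List.pyGet? lec p.1).getD "")) : Int))
      else d)
    (d.insert t 0)

-- B's single-pass body.
def pvStepB (spec : String) (c : String → Int) (d : PySem.Dict String Int)
    (p : String × String × String) : PySem.Dict String Int :=
  if p.1 = spec ∧ d.contains p.2.1 then
    d.insert p.2.1 (d.getD p.2.1 0 + c p.2.2)
  else d

theorem pv_keys_insert_eq (d : PySem.Dict String Int) (t : String) (v : Int) :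
    (d.insert t v).keys = if t ∈ d.keys then d.keys else d.keys ++ [t] := by
  by_cases h : d.contains t = true
  · rw [PySem.Dict.keys_insert_of_contains _ _ h]
    rw [if_pos ((PySem.Dict.contains_iff_mem_keys d t).mp h)]
  · rw [PySem.Dict.keys_insert_of_not_contains _ _ (by simpa using h)]
    rw [if_neg (fun hm => h ((PySem.Dict.contains_iff_mem_keys d t).mpr hm))]
theorem pv_innerA_getD (spec t : String) (time lec lect : List String) (E : List (Int × String)) :
    ∀ (d : PySem.Dict String Int) (k : String),
    (E.foldl (fun d p =>
        if p.2 = spec ∧ (PySem.List.pyGet? time p.1).getD "" = t then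
          d.insert t (d.getD t 0 + ((lect.count ((PySem.List.pyGet? lec p.1).getD "")) : Int))
        else d) d).getD k 0
      = d.getD k 0 + (if k = t then pvSumA spec t time lec lect E else 0) := by
  induction E with
  | nil => intro d k; simp [pvSumA]
  | cons p E ih =>
    intro d k
    simp only [List.foldl_cons]
    by_cases hc : p.2 = spec ∧ (PySem.List.pyGet? time p.1).getD "" = t
    · rw [if_pos hc, ih]
      rw [PySem.Dict.getD_insert]
      simp only [pvSumA, List.map_cons, List.sum_cons, if_pos hc]
      by_cases hk : k = t
      · subst hk; simp; ring
      · simp [hk]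
    · rw [if_neg hc, ih]
      simp only [pvSumA, List.map_cons, List.sum_cons, if_neg hc]
      simp

theorem pv_innerA_keys (spec t : String) (time lec lect : List String) (E : List (Int × String)) :
    ∀ (d : PySem.Dict String Int), d.contains t = true →
    (E.foldl (fun d p =>
        if p.2 = spec ∧ (PySem.List.pyGet? time p.1).getD "" = t then
          d.insert t (d.getD t 0 + ((lect.count ((PySem.List.pyGet? lec p.1).getD "")) : Int))
        else d) d).keys = d.keys := by
  induction E with
  | nil => intro d _; rfl
  | cons p E ih =>
    intro d hd
    simp only [List.foldl_cons]
    by_cases hc : p.2 = spec ∧ (PySem.List.pyGet? time p.1).getD "" = t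
    · rw [if_pos hc, ih _ (PySem.Dict.contains_insert_self d t _),
        PySem.Dict.keys_insert_of_contains _ _ hd]
    · rw [if_neg hc, ih _ hd]
theorem pv_zip_keys (spec : String) (c : String → Int) (L : List (String × String × String)) :
    ∀ (d : PySem.Dict String Int), (L.foldl (pvStepB spec c) d).keys = d.keys := by
  induction L with
  | nil => intro d; rfl
  | cons p L ih =>
    intro d
    simp only [List.foldl_cons, pvStepB]
    by_cases hc : p.1 = spec ∧ d.contains p.2.1 = true
    · rw [if_pos hc, ih, PySem.Dict.keys_insert_of_contains _ _ hc.2]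
    · rw [if_neg hc, ih]

theorem pv_zip_getD (spec : String) (c : String → Int) (L : List (String × String × String)) :
    ∀ (d : PySem.Dict String Int) (k : String),
    (L.foldl (pvStepB spec c) d).getD k 0
      = d.getD k 0 + (if d.contains k = true then pvSumB spec k c L else 0) := by
  induction L with
  | nil => intro d k; simp [pvSumB]
  | cons p L ih =>
    intro d k
    simp only [List.foldl_cons, pvStepB]
    by_cases hc : p.1 = spec ∧ d.contains p.2.1 = true
    · rw [if_pos hc, ih]
      have hck : (d.insert p.2.1 (d.getD p.2.1 0 + c p.2.2)).contains k = d.contains k := by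
        rw [PySem.Dict.contains_insert]
        by_cases hk : k = p.2.1
        · subst hk; simp [hc.2]
        · simp [hk]
      rw [hck, PySem.Dict.getD_insert]
      simp only [pvSumB, List.map_cons, List.sum_cons]
      by_cases hdk : d.contains k = true
      · rw [if_pos hdk, if_pos hdk]
        by_cases hk : k = p.2.1
        · subst hk
          rw [if_pos rfl, if_pos ⟨hc.1, rfl⟩]
          ring
        · rw [if_neg hk, if_neg (fun h => hk h.2.symm)]
          ring
      · have hk : ¬ k = p.2.1 := fun h => hdk (h ▸ hc.2)
        rw [if_neg hk, if_neg hdk, if_neg hdk]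
    · rw [if_neg hc, ih]
      by_cases hdk : d.contains k = true
      · rw [if_pos hdk, if_pos hdk]
        simp only [pvSumB, List.map_cons, List.sum_cons]
        have : ¬ (p.1 = spec ∧ p.2.1 = k) := fun h => hc ⟨h.1, h.2 ▸ hdk⟩
        rw [if_neg this]
        ring
      · rw [if_neg hdk, if_neg hdk]
theorem pv_stepA_getD (spec : String) (room time lec lect : List String)
    (d : PySem.Dict String Int) (t k : String) :
    (pvStepA spec room time lec lect d t).getD k 0
      = if k = t then pvSumA spec t time lec lect (PySem.List.enumerate room) else d.getD k 0 := by
  rw [pvStepA, pv_innerA_getD, PySem.Dict.getD_insert]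
  by_cases hk : k = t <;> simp [hk]

theorem pv_stepA_keys (spec : String) (room time lec lect : List String)
    (d : PySem.Dict String Int) (t : String) :
    (pvStepA spec room time lec lect d t).keys
      = if t ∈ d.keys then d.keys else d.keys ++ [t] := by
  rw [pvStepA, pv_innerA_keys spec t time lec lect _ _ (PySem.Dict.contains_insert_self d t 0),
    pv_keys_insert_eq]

theorem pv_foldA_getD (spec : String) (room time lec lect : List String) (ts : List String) :
    ∀ (d : PySem.Dict String Int) (k : String),
    (ts.foldl (pvStepA spec room time lec lect) d).getD k 0
      = if k ∈ ts then pvSumA spec k time lec lect (PySem.List.enumerate room) else d.getD k 0 := by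
  induction ts with
  | nil => intro d k; simp
  | cons t ts ih =>
    intro d k
    simp only [List.foldl_cons]
    rw [ih, pv_stepA_getD]
    by_cases hts : k ∈ ts
    · simp [hts]
    · by_cases hk : k = t
      · subst hk; simp [hts]
      · simp [hts, hk]

theorem pv_foldA_nodup (spec : String) (room time lec lect : List String) (ts : List String) :
    ∀ (d : PySem.Dict String Int), d.keys.Nodup →
    (ts.foldl (pvStepA spec room time lec lect) d).keys.Nodup := by
  induction ts with
  | nil => intro d h; exact h
  | cons t ts ih =>
    intro d h
    refine ih _ ?_
    rw [pv_stepA_keys]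
    by_cases hm : t ∈ d.keys
    · simpa [hm] using h
    · rw [if_neg hm]
      simp only [List.nodup_append, List.nodup_cons, List.nodup_nil, List.not_mem_nil,
        not_false_iff, true_and, and_true]
      refine ⟨h, ?_⟩
      intro a ha b hb
      simp only [List.mem_singleton] at hb
      exact fun hab => hm ((hab.trans hb) ▸ ha)

theorem pv_keysAB (spec : String) (room time lec lect : List String) (ts : List String) :
    ∀ (d d' : PySem.Dict String Int), d.keys = d'.keys →
    (ts.foldl (pvStepA spec room time lec lect) d).keys
      = (ts.foldl (fun (d : PySem.Dict String Int) t => d.insert t 0) d').keys := by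
  induction ts with
  | nil => intro d d' h; exact h
  | cons t ts ih =>
    intro d d' h
    simp only [List.foldl_cons]
    refine ih _ _ ?_
    rw [pv_stepA_keys, pv_keys_insert_eq, h]

theorem pv_init_getD (ts : List String) :
    ∀ (d : PySem.Dict String Int), (∀ k, d.getD k 0 = 0) →
    ∀ k, (ts.foldl (fun (d : PySem.Dict String Int) t => d.insert t 0) d).getD k 0 = 0 := by
  induction ts with
  | nil => intro d h k; exact h k
  | cons t ts ih =>
    intro d h k
    refine ih _ ?_ k
    intro k'
    rw [PySem.Dict.getD_insert]
    by_cases hk : k' = t <;> simp [hk, h k']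
theorem pv_shift (spec t : String) (lect : List String) (x y : String) (time lec : List String)
    (room : List String) :
    ∀ (s : Nat),
    pvSumA spec t (x :: time) (y :: lec) lect (PySem.List.enumerate room ((s : Int) + 1))
      = pvSumA spec t time lec lect (PySem.List.enumerate room (s : Int)) := by
  induction room with
  | nil => intro s; simp [pvSumA]
  | cons r room ih =>
    intro s
    rw [PySem.List.enumerate_cons, PySem.List.enumerate_cons]
    simp only [pvSumA, List.map_cons, List.sum_cons] at ih ⊢
    rw [PySem.List.pyGet?_cons_succ, PySem.List.pyGet?_cons_succ]
    have h2 : ((s : Int) + 1) + 1 = ((s + 1 : Nat) : Int) + 1 := by push_cast; ring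
    rw [h2]
    have := ih (s + 1)
    rw [this]
    norm_cast

theorem pv_zeroA (spec t : String) (time lec lect : List String) (room : List String) :
    ∀ (s : Nat),
    (∀ j < room.length, ¬ (room.getD j "" = spec ∧ (PySem.List.pyGet? time ((s + j : Nat) : Int)).getD "" = t)) →
    pvSumA spec t time lec lect (PySem.List.enumerate room (s : Int)) = 0 := by
  induction room with
  | nil => intro s _; simp [pvSumA]
  | cons r room ih =>
    intro s h
    rw [PySem.List.enumerate_cons]
    simp only [pvSumA, List.map_cons, List.sum_cons]
    have h0 := h 0 (by simp)
    simp only [List.getD_cons_zero, Nat.add_zero] at h0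
    rw [if_neg h0]
    have h2 : ((s : Int)) + 1 = ((s + 1 : Nat) : Int) := by push_cast; ring
    rw [h2]
    have hz2 := ih (s + 1) ?_
    · simp only [pvSumA] at hz2
      rw [hz2]
      simp
    · intro j hj
      have := h (j + 1) (by simpa using Nat.succ_lt_succ hj)
      simpa [Nat.add_comm, Nat.add_assoc, Nat.add_left_comm] using this

theorem pv_sums_eq (spec t : String) (lect ts : List String) (ht : t ∈ ts) :
    ∀ (room time lec : List String),
    (∀ i < room.length, room.getD i "" = spec →
        i < time.length ∧ (time.getD i "" ∈ ts → i < lec.length)) →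
    pvSumA spec t time lec lect (PySem.List.enumerate room 0)
      = pvSumB spec t (fun l => ((lect.count l : Int))) (room.zip (time.zip lec)) := by
  intro room
  induction room with
  | nil => intro time lec _; simp [pvSumA, pvSumB]
  | cons r room ih =>
    intro time lec H
    match time, lec with
    | [], lec =>
      -- no index may match: room entries equal to spec would need time_list access
      have hz : ∀ j < (r :: room).length,
          ¬ ((r :: room).getD j "" = spec ∧ (PySem.List.pyGet? ([] : List String) ((0 + j : Nat) : Int)).getD "" = t) := by
        intro j hj hcon
        exact absurd (H j hj hcon.1).1 (by simp)
      have := pv_zeroA spec t [] lec lect (r :: room) 0 hz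
      simpa [pvSumB] using this
    | tm :: time', [] =>
      -- lec_list empty: any match would force tm ∉ ts, hence tm ≠ t; deeper indices cannot match either
      have hz : ∀ j < (r :: room).length,
          ¬ ((r :: room).getD j "" = spec ∧ (PySem.List.pyGet? (tm :: time') ((0 + j : Nat) : Int)).getD "" = t) := by
        intro j hj hcon
        have h1 := H j hj hcon.1
        have h2 : (tm :: time').getD j "" ∈ ts → False := by
          intro hmem
          exact absurd (h1.2 hmem) (by simp)
        apply h2
        have : (PySem.List.pyGet? (tm :: time') ((j : Nat) : Int)).getD "" = (tm :: time').getD j "" := by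
          rw [PySem.List.pyGet?_natCast]
          rcases Nat.lt_or_ge j (tm :: time').length with hj' | hj'
          · simp [List.getElem?_eq_getElem hj']
          · simp [List.getElem?_eq_none hj']
        rw [← this]
        rw [show ((0 + j : Nat) : Int) = ((j : Nat) : Int) by push_cast; ring] at hcon
        exact hcon.2 ▸ ht
      have := pv_zeroA spec t (tm :: time') [] lect (r :: room) 0 hz
      simpa [pvSumB] using this
    | tm :: time', l :: lec' =>
      rw [PySem.List.enumerate_cons]
      simp only [pvSumA, List.map_cons, List.sum_cons]
      rw [show ((0 : Int) + 1) = ((0 : Nat) : Int) + 1 by norm_cast]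
      have hsh := pv_shift spec t lect tm l time' lec' room 0
      simp only [pvSumA] at hsh
      rw [hsh]
      have hih := ih time' lec' ?_
      · simp only [pvSumA] at hih
        simp only [Nat.cast_zero]
        rw [hih]
        simp only [List.zip_cons_cons, pvSumB, List.map_cons, List.sum_cons]
        rw [PySem.List.pyGet?_zero_cons, PySem.List.pyGet?_zero_cons]
        simp
      · intro i hi hspec
        have := H (i + 1) (by simpa using Nat.succ_lt_succ hi) (by simpa using hspec)
        constructor
        · exact Nat.lt_of_succ_lt_succ (by simpa using this.1)
        · intro hmem
          exact Nat.lt_of_succ_lt_succ (by simpa using this.2 (by simpa using hmem))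

-- swap counts.getD for lecture_list.count inside B's sum
theorem pv_sumB_counts (spec t : String) (lect : List String) (L : List (String × String × String)) :
    pvSumB spec t (fun l => ((lect.foldl (fun c lec => c.insert lec (c.getD lec 0 + 1)) PySem.Dict.empty).getD l 0)) L
      = pvSumB spec t (fun l => ((lect.count l : Int))) L := by
  simp only [pvSumB]
  congr 1
  apply List.map_congr_left
  intro p _
  rw [PySem.Dict.getD_foldl_insert_add_one, PySem.Dict.getD_empty]
  simp

-- ===== VERDICT (by name: the statement is the Claim_ definition above) =====
theorem count_students_in_room_v5_spec : Claim_equal_count_students_in_room_v5 := by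
  intro spec room time lec lect ts _ hpre
  unfold Spec_count_students_in_room_v5
  have eA : count_students_in_room_v5 spec room time lec lect ts
      = (ts.foldl (pvStepA spec room time lec lect) PySem.Dict.empty).items := rfl
  have eB : count_students_in_room_v5_alt spec room time lec lect ts
      = ((room.zip (time.zip lec)).foldl
          (pvStepB spec (fun l => ((lect.foldl (fun c lec => c.insert lec (c.getD lec 0 + 1)) PySem.Dict.empty).getD l 0)))
          (ts.foldl (fun (d : PySem.Dict String Int) t => d.insert t 0) PySem.Dict.empty)).items := rfl
  rw [eA, eB]
  set c : String → Int := fun l => ((lect.foldl (fun c lec => c.insert lec (c.getD lec 0 + 1)) PySem.Dict.empty).getD l 0) with hc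
  set d0 : PySem.Dict String Int := ts.foldl (fun (d : PySem.Dict String Int) t => d.insert t 0) PySem.Dict.empty with hd0
  have hnd0 : d0.keys.Nodup := by
    rw [hd0]
    exact PySem.Dict.nodup_keys_foldl_insert ts (fun _ _ => (0 : Int)) PySem.Dict.empty (by simp)
  have hmem0 : ∀ k, k ∈ d0.keys → k ∈ ts := by
    intro k hk
    rw [hd0, PySem.Dict.keys_foldl_insert (f := fun _ _ => (0 : Int))] at hk
    simp only [PySem.Dict.keys_empty] at hk
    exact (PySem.Set.mem_ofList ts k).mp hk
  have hndA : (ts.foldl (pvStepA spec room time lec lect) PySem.Dict.empty).keys.Nodup :=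
    pv_foldA_nodup spec room time lec lect ts PySem.Dict.empty (by simp)
  have hkeysA : (ts.foldl (pvStepA spec room time lec lect) PySem.Dict.empty).keys = d0.keys := by
    rw [hd0]
    exact pv_keysAB spec room time lec lect ts PySem.Dict.empty PySem.Dict.empty rfl
  have hkeysB : ((room.zip (time.zip lec)).foldl (pvStepB spec c) d0).keys = d0.keys :=
    pv_zip_keys spec c (room.zip (time.zip lec)) d0
  have hndB : ((room.zip (time.zip lec)).foldl (pvStepB spec c) d0).keys.Nodup := by
    rw [hkeysB]; exact hnd0
  rw [PySem.Dict.items_eq_map_keys _ hndA 0, PySem.Dict.items_eq_map_keys _ hndB 0,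
    hkeysA, hkeysB]
  apply List.map_congr_left
  intro k hk
  have hkts : k ∈ ts := hmem0 k hk
  have hts_ne : ts ≠ [] := List.ne_nil_of_mem hkts
  have hA : (ts.foldl (pvStepA spec room time lec lect) PySem.Dict.empty).getD k 0
      = pvSumA spec k time lec lect (PySem.List.enumerate room) := by
    rw [pv_foldA_getD, if_pos hkts]
  have hB : ((room.zip (time.zip lec)).foldl (pvStepB spec c) d0).getD k 0
      = pvSumB spec k c (room.zip (time.zip lec)) := by
    rw [pv_zip_getD, if_pos ((PySem.Dict.contains_iff_mem_keys d0 k).mpr hk),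
      pv_init_getD ts PySem.Dict.empty (fun _ => by simp) k]
    simp
  rw [hA, hB, hc, pv_sumB_counts]
  have := pv_sums_eq spec k lect ts hkts room time lec (hpre hts_ne)
  rw [this]
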